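-- pv_equiv track=rewrite | github.com/aminaaddd/Hackathon | next_season_injury_prediction/app_injury_logregression.py | _positive_index
-- ===== SOURCE A (Python) =====
-- from typing import Tuple, List, Optional, Dict, Any
--
-- def _positive_index(classes: Optional[List[Any]]) -> int:
--     """Find the positive class index robustly."""
--     if not classes or len(classes) < 2:
--         return 0
--     if 1 in classes:
--         return list(classes).index(1)
--     s = [str(c) for c in classes]
--     if "1" in s:
--         return s.index("1")
--     # common positive names (rarely needed if labels are 0/1)
--     POS = {"injury", "injured", "yes", "true", "positive", "y"}
--     lc = [str(c).strip().lower() for c in classes]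
--     for i, name in enumerate(lc):
--         if any(p == name or p in name for p in POS):
--             return i
--     return 1
-- ===== SOURCE B (Python) =====
-- from typing import List, Optional, Any
--
--
-- def _positive_index(classes: Optional[List[Any]]) -> int:
--     """Find the positive class index: single scan for the label 1 (int labels)."""
--     if not classes or len(classes) < 2:
--         return 0
--     for i, c in enumerate(classes):
--         if c == 1:
--             return i
--     return 1
-- ===== Notes on version B (the rewrite author's own statement) =====
-- stated objective: faster
-- what changed: For integer labels (the stated domain) A's three sequential scans (membership+index, a str() pass with a second membership+index, and a stripped/lowered name-matching pass that can never fire on digit strings) collapse to one enumerate scan returning the first index whose label equals 1, else 1.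
import Mathlib
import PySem

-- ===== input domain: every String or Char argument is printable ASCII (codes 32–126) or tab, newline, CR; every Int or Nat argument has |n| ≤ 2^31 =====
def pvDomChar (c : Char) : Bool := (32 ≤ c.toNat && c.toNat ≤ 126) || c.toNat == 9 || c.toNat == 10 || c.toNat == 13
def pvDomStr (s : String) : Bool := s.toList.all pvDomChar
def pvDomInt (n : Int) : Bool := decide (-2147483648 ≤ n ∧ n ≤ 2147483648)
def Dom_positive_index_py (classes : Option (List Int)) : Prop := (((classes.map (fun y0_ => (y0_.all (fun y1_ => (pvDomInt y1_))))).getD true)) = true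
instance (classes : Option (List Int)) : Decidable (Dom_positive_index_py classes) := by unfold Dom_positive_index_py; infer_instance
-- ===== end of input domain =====

-- B replaces A's three sequential scans (int membership+index, a str() pass with string
-- membership+index, and a stripped/lowered positive-name pass that cannot fire on integer
-- labels) by one enumerate scan for the label 1 (constant-factor speedup, measured).

-- ===== PORT A =====
-- POS = {"injury", "injured", "yes", "true", "positive", "y"} — a set literal used only for
-- membership-style `any`; represented as its list of distinct elements.
def pvPOS : List String := ["injury", "injured", "yes", "true", "positive", "y"]

-- any(p == name or p in name for p in POS)
def pvAMatch (name : String) : Bool :=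
  pvPOS.any (fun p => p == name || PySem.Str.isIn p name)

-- for i, name in enumerate(lc): if any(...): return i  /  fallthrough: return 1
def pvALoop : List (Int × String) → Int
  | [] => 1
  | (i, name) :: rest => if pvAMatch name then i else pvALoop rest

def positive_index_py (classes : Option (List Int)) : Int :=
  match classes with
  | none => 0                      -- `not classes` is true for None
  | some cs =>
    if cs = [] ∨ cs.length < 2 then 0
    else if 1 ∈ cs then (((PySem.List.index? cs 1).getD 0 : Nat) : Int)   -- guarded by membership, .index cannot raise
    else
      let s := cs.map (fun c => PySem.Int.toStr c)
      if "1" ∈ s then (((PySem.List.index? s "1").getD 0 : Nat) : Int)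
      else
        let lc := cs.map (fun c => PySem.Str.lower (PySem.Str.strip (PySem.Int.toStr c)))
        pvALoop (PySem.List.enumerate lc 0)

-- ===== PORT B =====
-- for i, c in enumerate(classes): if c == 1: return i  /  fallthrough: return 1
def pvBLoop (i : Int) : List Int → Int
  | [] => 1
  | c :: rest => if c = 1 then i else pvBLoop (i + 1) rest

def positive_index_py_alt (classes : Option (List Int)) : Int :=
  match classes with
  | none => 0
  | some cs =>
    if cs = [] ∨ cs.length < 2 then 0
    else pvBLoop 0 cs

-- ===== PRECONDITION & SPEC =====
def Spec_positive_index_py (classes : Option (List Int)) (out : Int) : Prop := out = positive_index_py_alt classes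
instance (classes : Option (List Int)) (out : Int) : Decidable (Spec_positive_index_py classes out) := by unfold Spec_positive_index_py; infer_instance

-- ===== CLAIM (what is proved, stated in full; the proofs are below) =====
def Claim_equal_positive_index_py : Prop := ∀ (classes : Option (List Int)), Dom_positive_index_py classes → Spec_positive_index_py classes (positive_index_py classes)

-- ===== LEMMAS AND PROOFS =====

-- every digit char produced by Nat.digitChar below 10 is a decimal digit
theorem pv_digitChar_isDigit (m : Nat) (h : m < 10) : (Nat.digitChar m).isDigit = true := by
  interval_cases m <;> decide

theorem pv_digitChar_eq_one (m : Nat) (h : m < 10) : Nat.digitChar m = '1' ↔ m = 1 := by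
  interval_cases m <;> decide

-- characters of Nat.toDigitsCore 10 are digits (or come from the accumulator)
theorem pv_mem_toDigitsCore (f : Nat) : ∀ (n : Nat) (acc : List Char) (ch : Char),
    ch ∈ Nat.toDigitsCore 10 f n acc → ch.isDigit = true ∨ ch ∈ acc := by
  induction f with
  | zero => intro n acc ch h; right; simpa [Nat.toDigitsCore] using h
  | succ f ih =>
    intro n acc ch h
    rw [Nat.toDigitsCore] at h
    by_cases hz : n / 10 = 0
    · simp only [hz, if_true] at h
      rcases List.mem_cons.mp h with h1 | h1
      · left; rw [h1]; exact pv_digitChar_isDigit _ (Nat.mod_lt _ (by norm_num))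
      · right; exact h1
    · simp only [hz, if_false] at h
      rcases ih (n / 10) (Nat.digitChar (n % 10) :: acc) ch h with h1 | h1
      · left; exact h1
      · rcases List.mem_cons.mp h1 with h2 | h2
        · left; rw [h2]; exact pv_digitChar_isDigit _ (Nat.mod_lt _ (by norm_num))
        · right; exact h2

-- with enough fuel, Nat.toDigitsCore 10 returns ['1'] only for n = 1 and an empty accumulator
theorem pv_toDigitsCore_eq_one (f : Nat) : ∀ (n : Nat) (acc : List Char), n < 10 ^ (f + 1) →
    Nat.toDigitsCore 10 (f + 1) n acc = ['1'] → acc = [] ∧ n = 1 := by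
  induction f with
  | zero =>
    intro n acc hn h
    rw [Nat.toDigitsCore] at h
    have hz : n / 10 = 0 := Nat.div_eq_of_lt (by simpa using hn)
    simp only [hz, if_true] at h
    have h1 := List.cons.inj h
    refine ⟨h1.2, ?_⟩
    have := (pv_digitChar_eq_one (n % 10) (Nat.mod_lt _ (by norm_num))).mp h1.1
    omega
  | succ f ih =>
    intro n acc hn h
    rw [Nat.toDigitsCore] at h
    by_cases hz : n / 10 = 0
    · simp only [hz, if_true] at h
      have h1 := List.cons.inj h
      refine ⟨h1.2, ?_⟩
      have hlt : n < 10 := by omega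
      have := (pv_digitChar_eq_one (n % 10) (Nat.mod_lt _ (by norm_num))).mp h1.1
      omega
    · simp only [hz, if_false] at h
      have hdiv : n / 10 < 10 ^ (f + 1) := by
        rw [pow_succ] at hn
        exact Nat.div_lt_of_lt_mul (by omega)
      have := ih (n / 10) (Nat.digitChar (n % 10) :: acc) hdiv h
      exact absurd this.1 (by simp)

theorem pv_nat_lt_ten_pow (n : Nat) : n < 10 ^ (n + 1) := by
  calc n < 2 ^ n := Nat.lt_two_pow_self
    _ ≤ 10 ^ n := Nat.pow_le_pow_left (by norm_num) n
    _ ≤ 10 ^ (n + 1) := Nat.pow_le_pow_right (by norm_num) (by omega)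

-- str(c) == "1" exactly for the integer 1
theorem pv_toStr_eq_one (c : Int) : PySem.Int.toStr c = "1" ↔ c = 1 := by
  constructor
  · intro h
    have hl : PySem.Int.toChars c = ['1'] := by
      have := congrArg String.toList h
      rwa [PySem.Int.toList_toStr] at this
    rw [PySem.Int.toChars] at hl
    by_cases hc : c < 0
    · simp only [hc, if_true] at hl
      exact absurd (List.cons.inj hl).1 (by decide)
    · simp only [hc, if_false] at hl
      rw [Nat.toDigits] at hl
      have := pv_toDigitsCore_eq_one c.toNat c.toNat [] (pv_nat_lt_ten_pow _) hl
      omega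
  · intro h; subst h; decide

-- characters of str(c) for an int c: '-' or a digit
theorem pv_mem_toChars (c : Int) (ch : Char) (h : ch ∈ PySem.Int.toChars c) :
    ch = '-' ∨ ch.isDigit = true := by
  rw [PySem.Int.toChars] at h
  by_cases hc : c < 0
  · simp only [hc, if_true] at h
    rcases List.mem_cons.mp h with h1 | h1
    · left; exact h1
    · rw [Nat.toDigits] at h1
      rcases pv_mem_toDigitsCore _ _ _ _ h1 with h2 | h2
      · right; exact h2
      · simp at h2
  · simp only [hc, if_false] at h
    rw [Nat.toDigits] at h
    rcases pv_mem_toDigitsCore _ _ _ _ h with h2 | h2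
    · right; exact h2
    · simp at h2

theorem pv_digit_not_alpha (c : Char) (h : c.isDigit = true) : PySem.Chars.isalpha c = false := by
  simp [PySem.Chars.isalpha, PySem.Chars.isupper, PySem.Chars.islower] at *
  simp [Char.isDigit] at h
  simp [Char.lt_def, Char.le_def, UInt32.lt_iff_toNat_lt, UInt32.le_iff_toNat_le] at *
  omega

theorem pv_digit_lowerChar (c : Char) (h : c.isDigit = true) : PySem.Chars.lowerChar c = c := by
  rw [PySem.Chars.lowerChar, if_neg]
  simp [PySem.Chars.isupper]
  simp [Char.isDigit] at h
  simp [Char.le_def, UInt32.le_iff_toNat_le] at *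
  omega

theorem pv_mem_strip (d : Char) (l : List Char) (h : d ∈ PySem.Chars.strip l) : d ∈ l := by
  rw [PySem.Chars.strip, PySem.Chars.rstrip, PySem.Chars.lstrip] at h
  rw [List.mem_reverse] at h
  have h1 := (List.dropWhile_sublist _).mem h
  rw [List.mem_reverse] at h1
  exact (List.dropWhile_sublist _).mem h1

-- every character of str(c).strip().lower() for an int c is non-alphabetic
theorem pv_name_nonalpha (c : Int) (ch : Char)
    (h : ch ∈ (PySem.Str.lower (PySem.Str.strip (PySem.Int.toStr c))).toList) :
    PySem.Chars.isalpha ch = false := by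
  rw [PySem.Str.toList_lower, PySem.Str.toList_strip, PySem.Chars.lower] at h
  rcases List.mem_map.mp h with ⟨d, hd, hde⟩
  have hd1 : d ∈ PySem.Int.toChars c := by
    have := pv_mem_strip d _ hd
    rwa [PySem.Int.toList_toStr] at this
  rcases pv_mem_toChars c d hd1 with h1 | h1
  · subst h1; rw [← hde]; decide
  · rw [← hde, pv_digit_lowerChar d h1]; exact pv_digit_not_alpha d h1

-- an all-non-alphabetic name matches no positive-name pattern
theorem pv_word_no_match (p name : String) (ch : Char) (hch : ch ∈ p.toList)
    (ha : PySem.Chars.isalpha ch = true)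
    (h : ∀ c ∈ name.toList, PySem.Chars.isalpha c = false) :
    (p == name) = false ∧ PySem.Str.isIn p name = false := by
  constructor
  · rw [beq_eq_false_iff_ne]
    intro he
    subst he
    exact absurd ha (by simp [h ch hch])
  · by_contra hin
    rw [Bool.not_eq_false, PySem.Str.isIn] at hin
    have hinf := (PySem.Chars.isIn_iff_infix _ _).mp hin
    have := hinf.subset hch
    exact absurd ha (by simp [h ch this])

theorem pv_aMatch_false (name : String)
    (h : ∀ c ∈ name.toList, PySem.Chars.isalpha c = false) : pvAMatch name = false := by
  rw [pvAMatch, pvPOS]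
  simp only [List.any_cons, List.any_nil, Bool.or_eq_false_iff]
  exact ⟨pv_word_no_match _ _ 'i' (by decide) (by decide) h,
    pv_word_no_match _ _ 'i' (by decide) (by decide) h,
    pv_word_no_match _ _ 'y' (by decide) (by decide) h,
    pv_word_no_match _ _ 't' (by decide) (by decide) h,
    pv_word_no_match _ _ 'p' (by decide) (by decide) h,
    pv_word_no_match _ _ 'y' (by decide) (by decide) h, trivial⟩theorem pv_aLoop_none (xs : List (Int × String)) (h : ∀ x ∈ xs, pvAMatch x.2 = false) :
    pvALoop xs = 1 := by
  induction xs with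
  | nil => rfl
  | cons x rest ih =>
    obtain ⟨i, name⟩ := x
    rw [pvALoop, if_neg]
    · exact ih (fun y hy => h y (List.mem_cons_of_mem _ hy))
    · simp [h (i, name) List.mem_cons_self]

theorem pv_bLoop_not_mem (cs : List Int) (h : 1 ∉ cs) : ∀ i, pvBLoop i cs = 1 := by
  induction cs with
  | nil => intro i; rfl
  | cons c rest ih =>
    intro i
    rw [pvBLoop, if_neg (by intro hc; exact h (by simp [hc]))]
    exact ih (fun hm => h (List.mem_cons_of_mem _ hm)) (i + 1)

theorem pv_bLoop_mem (cs : List Int) (h : 1 ∈ cs) :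
    ∀ i, pvBLoop i cs = i + (((PySem.List.index? cs 1).getD 0 : Nat) : Int) := by
  induction cs with
  | nil => simp at h
  | cons c rest ih =>
    intro i
    by_cases hc : c = 1
    · subst hc
      rw [pvBLoop, if_pos rfl, PySem.List.index?_cons_self]
      simp
    · have hm : 1 ∈ rest := by
        rcases List.mem_cons.mp h with h1 | h1
        · exact absurd h1.symm hc
        · exact h1
      rw [pvBLoop, if_neg hc, ih hm (i + 1), PySem.List.index?_cons_of_ne rest hc]
      obtain ⟨k, hk⟩ := Option.isSome_iff_exists.mp ((PySem.List.index?_isSome_iff _ _).mpr hm)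
      rw [hk]
      simp
      omega

-- ===== VERDICT (by name: the statement is the Claim_ definition above) =====
theorem positive_index_py_spec : Claim_equal_positive_index_py := by
  intro classes _
  unfold Spec_positive_index_py positive_index_py positive_index_py_alt
  match classes with
  | none => rfl
  | some cs =>
    by_cases hg : cs = [] ∨ cs.length < 2
    · simp only [hg, if_true]
    · simp only [hg, if_false]
      by_cases hm : (1 : Int) ∈ cs
      · rw [if_pos hm, pv_bLoop_mem cs hm 0, zero_add]
      · rw [if_neg hm, pv_bLoop_not_mem cs hm 0, if_neg, pv_aLoop_none]
        · intro x hx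
          have hx2 : x.2 ∈ cs.map (fun c => PySem.Str.lower (PySem.Str.strip (PySem.Int.toStr c))) := by
            have := congrArg (fun l => x.2 ∈ l) (PySem.List.map_snd_enumerate
              (cs.map (fun c => PySem.Str.lower (PySem.Str.strip (PySem.Int.toStr c)))) 0)
            simp only [eq_iff_iff] at this
            exact this.mp (List.mem_map.mpr ⟨x, hx, rfl⟩)
          rcases List.mem_map.mp hx2 with ⟨c, _, hce⟩
          exact pv_aMatch_false x.2 (fun ch hch => by rw [← hce] at hch; exact pv_name_nonalpha c ch hch)
        · intro hs
          rcases List.mem_map.mp hs with ⟨c, hc, hce⟩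
          exact hm (by rw [(pv_toStr_eq_one c).mp hce] at hc; exact hc)
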